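-- pv_equiv track=rewrite | github.com/GabeNaturesSeed/nature-seed-data | spring-2026-recovery/scripts/push_profile_properties.py | assign_primary_category
-- ===== SOURCE A (Python) =====
-- CATEGORY_PRIORITY = ["Pasture", "Lawn", "Wildflower", "Clover", "Specialty", "California", "Planting Aids"]
--
-- def assign_primary_category(email: str, category_map: dict) -> str:
--     """
--     Determine the primary seed category for a customer.
--     Uses the category_map 'groups' field and picks the first match in priority order.
--     """
--     info = category_map.get(email)
--     if not info:
--         return "Unknown"
--     groups = info.get("groups", [])
--     for priority_cat in CATEGORY_PRIORITY:
--         if priority_cat in groups: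
--             return priority_cat
--     # If none matched, return the first group or Unknown
--     return groups[0] if groups else "Unknown"
-- ===== SOURCE B (Python) =====
-- CATEGORY_PRIORITY = ["Pasture", "Lawn", "Wildflower", "Clover", "Specialty", "California", "Planting Aids"]
-- RANK = {cat: i for i, cat in enumerate(CATEGORY_PRIORITY)}
--
-- def assign_primary_category(email: str, category_map: dict) -> str:
--     info = category_map.get(email)
--     if not info:
--         return "Unknown"
--     groups = info.get("groups", [])
--     best = None
--     best_rank = len(CATEGORY_PRIORITY)
--     for g in groups:
--         r = RANK.get(g)
--         if r is not None and r < best_rank: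
--             best, best_rank = g, r
--     if best is not None:
--         return best
--     return groups[0] if groups else "Unknown"
-- ===== Notes on version B (the rewrite author's own statement) =====
-- stated objective: alternative
-- what changed: B scans the customer's groups once against a precomputed category->rank index, tracking the minimum-rank group, instead of scanning the fixed priority list and testing membership of each priority category in the groups list.
import Mathlib
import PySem

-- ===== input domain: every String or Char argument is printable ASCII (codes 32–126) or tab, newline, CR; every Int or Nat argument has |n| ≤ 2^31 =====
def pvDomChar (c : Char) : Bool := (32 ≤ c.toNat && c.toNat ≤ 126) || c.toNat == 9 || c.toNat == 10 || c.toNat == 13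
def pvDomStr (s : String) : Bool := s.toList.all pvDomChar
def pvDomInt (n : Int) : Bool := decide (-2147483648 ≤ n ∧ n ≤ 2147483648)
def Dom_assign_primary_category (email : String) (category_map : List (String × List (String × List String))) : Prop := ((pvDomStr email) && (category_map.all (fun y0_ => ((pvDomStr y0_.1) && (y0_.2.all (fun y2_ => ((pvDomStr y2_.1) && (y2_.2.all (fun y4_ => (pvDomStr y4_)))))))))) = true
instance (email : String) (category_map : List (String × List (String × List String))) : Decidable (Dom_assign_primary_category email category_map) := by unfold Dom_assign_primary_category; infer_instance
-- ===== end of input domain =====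

-- B scans the groups once against a rank index instead of scanning the priority list; alternative decomposition, same behaviour.

-- ===== PORT A =====
def CATEGORY_PRIORITY : List String :=
  ["Pasture", "Lawn", "Wildflower", "Clover", "Specialty", "California", "Planting Aids"]

-- the 'for priority_cat in CATEGORY_PRIORITY' loop of A
def firstPriority (groups : List String) : List String → Option String
  | [] => none
  | c :: rest => if groups.contains c then some c else firstPriority groups rest

def assign_primary_category (email : String) (category_map : List (String × List (String × List String))) : String :=
  match (PySem.Dict.mk category_map).get? email with
  | none => "Unknown"
  | some info =>
    if info = [] then "Unknown"   -- 'if not info' on a present empty dict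
    else
      let groups := (PySem.Dict.mk info).getD "groups" []
      match firstPriority groups CATEGORY_PRIORITY with
      | some c => c
      | none => match groups with
                | [] => "Unknown"
                | g :: _ => g

-- ===== PORT B =====
-- RANK = {cat: i for i, cat in enumerate(CATEGORY_PRIORITY)}
def RANK : PySem.Dict String Int :=
  PySem.Dict.ofList ((PySem.List.enumerate CATEGORY_PRIORITY).map (fun p => (p.2, p.1)))

-- one step of the 'for g in groups' loop of B
def bestStep (st : Option String × Int) (g : String) : Option String × Int :=
  match RANK.get? g with
  | some r => if r < st.2 then (some g, r) else st
  | none => st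

def assign_primary_category_alt (email : String) (category_map : List (String × List (String × List String))) : String :=
  match (PySem.Dict.mk category_map).get? email with
  | none => "Unknown"
  | some info =>
    if info = [] then "Unknown"
    else
      let groups := (PySem.Dict.mk info).getD "groups" []
      let st := groups.foldl bestStep (none, (7 : Int))
      match st.1 with
      | some b => b
      | none => match groups with
                | [] => "Unknown"
                | g :: _ => g

-- ===== PRECONDITION & SPEC =====
def Spec_assign_primary_category (email : String) (category_map : List (String × List (String × List String))) (out : String) : Prop := out = assign_primary_category_alt email category_map
instance (email : String) (category_map : List (String × List (String × List String))) (out : String) : Decidable (Spec_assign_primary_category email category_map out) := by unfold Spec_assign_primary_category; infer_instance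

-- ===== CLAIM (what is proved, stated in full; the proofs are below) =====
def Claim_equal_assign_primary_category : Prop := ∀ (email : String) (category_map : List (String × List (String × List String))), Dom_assign_primary_category email category_map → Spec_assign_primary_category email category_map (assign_primary_category email category_map)

-- ===== LEMMAS AND PROOFS =====

lemma firstPriority_cons_pos {groups : List String} {c : String} (h : c ∈ groups)
    (rest : List String) : firstPriority groups (c :: rest) = some c := by
  simp [firstPriority, h]

lemma firstPriority_cons_neg {groups : List String} {c : String} (h : c ∉ groups)
    (rest : List String) : firstPriority groups (c :: rest) = firstPriority groups rest := by
  simp [firstPriority, h]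

-- the possible results of a RANK lookup, spelled out
lemma rank_cases (g : String) (r : Int) (h : RANK.get? g = some r) :
    (g = "Pasture" ∧ r = 0) ∨ (g = "Lawn" ∧ r = 1) ∨ (g = "Wildflower" ∧ r = 2) ∨
    (g = "Clover" ∧ r = 3) ∨ (g = "Specialty" ∧ r = 4) ∨ (g = "California" ∧ r = 5) ∨
    (g = "Planting Aids" ∧ r = 6) := by
  have hR : RANK = PySem.Dict.mk [("Pasture", (0:Int)), ("Lawn", 1), ("Wildflower", 2),
      ("Clover", 3), ("Specialty", 4), ("California", 5), ("Planting Aids", 6)] := by decide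
  rw [hR] at h
  simp only [PySem.Dict.get?_mk_cons] at h
  split_ifs at h with h1 h2 h3 h4 h5 h6 h7
  · exact Or.inl ⟨(eq_of_beq h1).symm, (Option.some.inj h).symm⟩
  · exact Or.inr (Or.inl ⟨(eq_of_beq h2).symm, (Option.some.inj h).symm⟩)
  · exact Or.inr (Or.inr (Or.inl ⟨(eq_of_beq h3).symm, (Option.some.inj h).symm⟩))
  · exact Or.inr (Or.inr (Or.inr (Or.inl ⟨(eq_of_beq h4).symm, (Option.some.inj h).symm⟩)))
  · exact Or.inr (Or.inr (Or.inr (Or.inr (Or.inl ⟨(eq_of_beq h5).symm, (Option.some.inj h).symm⟩))))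
  · exact Or.inr (Or.inr (Or.inr (Or.inr (Or.inr (Or.inl ⟨(eq_of_beq h6).symm, (Option.some.inj h).symm⟩)))))
  · exact Or.inr (Or.inr (Or.inr (Or.inr (Or.inr (Or.inr ⟨(eq_of_beq h7).symm, (Option.some.inj h).symm⟩)))))
  · simp [PySem.Dict.get?] at h

-- invariant of B's fold over the groups list
lemma fold_inv (gs : List String) :
    ∀ (b : Option String) (r : Int),
    (b = none → r = 7) →
    (∀ x, b = some x → RANK.get? x = some r) →
    let st := gs.foldl bestStep (b, r)
    (st.1 = none → st.2 = 7) ∧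
    (∀ x, st.1 = some x → RANK.get? x = some st.2) ∧
    (∀ x, st.1 = some x → b = some x ∨ x ∈ gs) ∧
    st.2 ≤ r ∧
    (∀ g ∈ gs, ∀ s, RANK.get? g = some s → st.2 ≤ s) ∧
    (st.2 = r → st.1 = b) := by
  induction gs with
  | nil =>
    intro b r h1 h2
    exact ⟨h1, h2, fun x hx => Or.inl hx, le_refl r, by simp, fun _ => rfl⟩
  | cons g gs ih =>
    intro b r h1 h2
    simp only [List.foldl_cons]
    cases hR : RANK.get? g with
    | none =>
      have hstep : bestStep (b, r) g = (b, r) := by simp [bestStep, hR]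
      rw [hstep]
      obtain ⟨i1, i2, i3, i4, i5, i6⟩ := ih b r h1 h2
      refine ⟨i1, i2, ?_, i4, ?_, i6⟩
      · intro x hx
        exact (i3 x hx).imp id (fun h => List.mem_cons_of_mem _ h)
      · intro g' hg' s hs
        rcases List.mem_cons.1 hg' with h | h
        · subst h; rw [hR] at hs; cases hs
        · exact i5 g' h s hs
    | some s =>
      by_cases hlt : s < r
      · have hstep : bestStep (b, r) g = (some g, s) := by simp [bestStep, hR, hlt]
        rw [hstep]
        obtain ⟨i1, i2, i3, i4, i5, i6⟩ := ih (some g) s (by simp)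
          (by intro x hx; cases hx; exact hR)
        refine ⟨i1, i2, ?_, le_of_lt (lt_of_le_of_lt i4 hlt), ?_, ?_⟩
        · intro x hx
          rcases i3 x hx with h | h
          · cases h; exact Or.inr List.mem_cons_self
          · exact Or.inr (List.mem_cons_of_mem _ h)
        · intro g' hg' t ht
          rcases List.mem_cons.1 hg' with h | h
          · subst h; rw [hR] at ht; cases ht; exact i4
          · exact i5 g' h t ht
        · intro heq
          exfalso
          have := lt_of_le_of_lt i4 hlt
          omega
      · have hstep : bestStep (b, r) g = (b, r) := by simp [bestStep, hR, hlt]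
        rw [hstep]
        obtain ⟨i1, i2, i3, i4, i5, i6⟩ := ih b r h1 h2
        refine ⟨i1, i2, ?_, i4, ?_, i6⟩
        · intro x hx
          exact (i3 x hx).imp id (fun h => List.mem_cons_of_mem _ h)
        · intro g' hg' t ht
          rcases List.mem_cons.1 hg' with h | h
          · subst h; rw [hR] at ht; cases ht; omega
          · exact i5 g' h t ht

-- A's loop returns exactly the value B's fold produced
lemma core (groups : List String) :
    (match (groups.foldl bestStep (none, (7 : Int))).1 with
     | some b => b
     | none => match groups with | [] => "Unknown" | g :: _ => g)
    = (match firstPriority groups CATEGORY_PRIORITY with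
       | some c => c
       | none => match groups with | [] => "Unknown" | g :: _ => g) := by
  obtain ⟨i1, i2, i3, i4, i5, i6⟩ := fold_inv groups none 7 (fun _ => rfl) (by simp)
  cases hb : (groups.foldl bestStep (none, (7 : Int))).1 with
  | none =>
    -- no group has a rank, so no priority category occurs in groups
    have hnone : ∀ g ∈ groups, RANK.get? g = none := by
      intro g hg
      cases hRg : RANK.get? g with
      | none => rfl
      | some s =>
        exfalso
        have hle := i5 g hg s hRg
        rw [i1 hb] at hle
        rcases rank_cases g s hRg with ⟨_,h⟩|⟨_,h⟩|⟨_,h⟩|⟨_,h⟩|⟨_,h⟩|⟨_,h⟩|⟨_,h⟩ <;> omega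
    have hnotin : ∀ p : String, ∀ i : Int, RANK.get? p = some i → p ∉ groups := by
      intro p i hp hm
      rw [hnone p hm] at hp
      cases hp
    have hfp : firstPriority groups CATEGORY_PRIORITY = none := by
      simp only [CATEGORY_PRIORITY]
      rw [firstPriority_cons_neg (hnotin "Pasture" 0 (by decide)),
          firstPriority_cons_neg (hnotin "Lawn" 1 (by decide)),
          firstPriority_cons_neg (hnotin "Wildflower" 2 (by decide)),
          firstPriority_cons_neg (hnotin "Clover" 3 (by decide)),
          firstPriority_cons_neg (hnotin "Specialty" 4 (by decide)),
          firstPriority_cons_neg (hnotin "California" 5 (by decide)),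
          firstPriority_cons_neg (hnotin "Planting Aids" 6 (by decide))]
      rfl
    rw [hfp]
  | some c =>
    have hrc := i2 c hb
    have hmem : c ∈ groups := by
      rcases i3 c hb with h | h
      · cases h
      · exact h
    have habsent : ∀ p : String, ∀ i : Int, RANK.get? p = some i →
        i < (groups.foldl bestStep (none, (7 : Int))).2 → p ∉ groups := by
      intro p i hp hi hm
      have := i5 p hm i hp
      omega
    have hfp : firstPriority groups CATEGORY_PRIORITY = some c := by
      rcases rank_cases c _ hrc with ⟨hc,h⟩|⟨hc,h⟩|⟨hc,h⟩|⟨hc,h⟩|⟨hc,h⟩|⟨hc,h⟩|⟨hc,h⟩ <;>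
        subst hc <;> simp only [CATEGORY_PRIORITY]
      · rw [firstPriority_cons_pos hmem]
      · rw [firstPriority_cons_neg (habsent "Pasture" 0 (by decide) (by omega)),
            firstPriority_cons_pos hmem]
      · rw [firstPriority_cons_neg (habsent "Pasture" 0 (by decide) (by omega)),
            firstPriority_cons_neg (habsent "Lawn" 1 (by decide) (by omega)),
            firstPriority_cons_pos hmem]
      · rw [firstPriority_cons_neg (habsent "Pasture" 0 (by decide) (by omega)),
            firstPriority_cons_neg (habsent "Lawn" 1 (by decide) (by omega)),
            firstPriority_cons_neg (habsent "Wildflower" 2 (by decide) (by omega)),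
            firstPriority_cons_pos hmem]
      · rw [firstPriority_cons_neg (habsent "Pasture" 0 (by decide) (by omega)),
            firstPriority_cons_neg (habsent "Lawn" 1 (by decide) (by omega)),
            firstPriority_cons_neg (habsent "Wildflower" 2 (by decide) (by omega)),
            firstPriority_cons_neg (habsent "Clover" 3 (by decide) (by omega)),
            firstPriority_cons_pos hmem]
      · rw [firstPriority_cons_neg (habsent "Pasture" 0 (by decide) (by omega)),
            firstPriority_cons_neg (habsent "Lawn" 1 (by decide) (by omega)),
            firstPriority_cons_neg (habsent "Wildflower" 2 (by decide) (by omega)),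
            firstPriority_cons_neg (habsent "Clover" 3 (by decide) (by omega)),
            firstPriority_cons_neg (habsent "Specialty" 4 (by decide) (by omega)),
            firstPriority_cons_pos hmem]
      · rw [firstPriority_cons_neg (habsent "Pasture" 0 (by decide) (by omega)),
            firstPriority_cons_neg (habsent "Lawn" 1 (by decide) (by omega)),
            firstPriority_cons_neg (habsent "Wildflower" 2 (by decide) (by omega)),
            firstPriority_cons_neg (habsent "Clover" 3 (by decide) (by omega)),
            firstPriority_cons_neg (habsent "Specialty" 4 (by decide) (by omega)),
            firstPriority_cons_neg (habsent "California" 5 (by decide) (by omega)),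
            firstPriority_cons_pos hmem]
    rw [hfp]

-- ===== VERDICT (by name: the statement is the Claim_ definition above) =====
theorem assign_primary_category_spec : Claim_equal_assign_primary_category := by
  intro email category_map _
  unfold Spec_assign_primary_category assign_primary_category assign_primary_category_alt
  cases (PySem.Dict.mk category_map).get? email with
  | none => rfl
  | some info =>
    by_cases h : info = []
    · simp [h]
    · simp only [h, if_false]
      exact (core ((PySem.Dict.mk info).getD "groups" [])).symm
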